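-- pv_equiv track=rewrite | github.com/LindseyL610/CS467-AdventureProject | Utilities.py | list_to_words
-- ===== SOURCE A (Python) =====
-- def list_to_words(object_list):
--   list_length = len(object_list)
--   list_string = ""
--   if list_length > 0:
--     for i in range(list_length):
--       # if there are at least 2 words, add "and" to final word
--       if i == (list_length - 1) and list_length >= 2:
--         list_string += " and"
--
--       # display word
--       list_string += " " + object_list[i]
--
--       # if there are at least 3 words, add comma to all but final word
--       if i != (list_length - 1) and list_length >= 3:
--         list_string += ","
--
--   return list_string
-- ===== SOURCE B (Python) =====
-- def list_to_words(object_list):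
--     if not object_list:
--         return ""
--     if len(object_list) == 1:
--         return " " + object_list[0]
--     sep = "," if len(object_list) >= 3 else ""
--     return " " + (sep + " ").join(object_list[:-1]) + sep + " and " + object_list[-1]
-- ===== Notes on version B (the rewrite author's own statement) =====
-- stated objective: simpler
-- what changed: Replaced the per-index loop with its i==last and length-threshold conditionals by two base cases plus a single separator-join over the front slice and explicit ' and '-tail handling.
import Mathlib
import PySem

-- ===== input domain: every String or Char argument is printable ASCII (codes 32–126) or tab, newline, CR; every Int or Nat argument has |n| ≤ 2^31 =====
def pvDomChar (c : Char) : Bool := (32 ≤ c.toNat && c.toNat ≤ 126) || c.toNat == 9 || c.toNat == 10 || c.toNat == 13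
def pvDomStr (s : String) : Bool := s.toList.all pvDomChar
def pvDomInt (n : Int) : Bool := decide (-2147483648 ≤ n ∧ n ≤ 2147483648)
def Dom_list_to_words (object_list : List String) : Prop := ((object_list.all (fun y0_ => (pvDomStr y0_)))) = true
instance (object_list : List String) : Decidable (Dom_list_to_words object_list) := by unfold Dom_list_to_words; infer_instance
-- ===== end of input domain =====

-- B replaces A's per-index loop (with its i==last / length-threshold conditionals) by base cases
-- plus a single join over the front slice; objective: simpler, same exact output including the
-- leading space and the Oxford comma.

-- ===== PORT A =====
-- object_list[i] is ported as pyGetD with default "": i always lies in range(len(object_list)).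
def list_to_words (object_list : List String) : String :=
  let list_length : Int := object_list.length
  let list_string : String := ""
  if list_length > 0 then
    (PySem.List.pyRange 0 list_length 1).foldl (fun list_string i =>
      let list_string := if i = list_length - 1 ∧ list_length ≥ 2 then list_string ++ " and" else list_string
      let list_string := list_string ++ " " ++ PySem.List.pyGetD object_list i ""
      if i ≠ list_length - 1 ∧ list_length ≥ 3 then list_string ++ "," else list_string) list_string
  else list_string

-- ===== PORT B =====
def list_to_words_alt (object_list : List String) : String :=
  match object_list with
  | [] => ""
  | [x] => " " ++ x
  | _ =>
    let sep : String := if object_list.length ≥ 3 then "," else ""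
    " " ++ PySem.Str.join (sep ++ " ") (PySem.List.slice object_list none (some (-1)))
      ++ sep ++ " and " ++ PySem.List.pyGetD object_list (-1) ""


-- ===== PRECONDITION & SPEC =====
def Spec_list_to_words (object_list : List String) (out : String) : Prop := out = list_to_words_alt object_list
instance (object_list : List String) (out : String) : Decidable (Spec_list_to_words object_list out) := by unfold Spec_list_to_words; infer_instance

-- ===== CLAIM (what is proved, stated in full; the proofs are below) =====
def Claim_equal_list_to_words : Prop := ∀ (object_list : List String), Dom_list_to_words object_list → Spec_list_to_words object_list (list_to_words object_list)

-- ===== LEMMAS AND PROOFS =====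
lemma join_singleton' (sep x : String) : PySem.Str.join sep [x] = x := by
  apply String.toList_inj.mp
  simp [PySem.Str.toList_join, PySem.Chars.join_singleton]

lemma join_cons_cons' (sep p q : String) (rest : List String) :
    PySem.Str.join sep (p :: q :: rest) = p ++ sep ++ PySem.Str.join sep (q :: rest) := by
  apply String.toList_inj.mp
  simp [PySem.Str.toList_join, PySem.Chars.join_cons_cons]

-- front fold characterisation
lemma foldl_words (sep : String) : ∀ (xs : List String) (x acc : String),
    (x :: xs).foldl (fun a s => a ++ " " ++ s ++ sep) acc
      = acc ++ " " ++ PySem.Str.join (sep ++ " ") (x :: xs) ++ sep := by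
  intro xs
  induction xs with
  | nil => intro x acc; simp [join_singleton']
  | cons y ys ih =>
    intro x acc
    rw [show (x :: y :: ys).foldl (fun a s => a ++ " " ++ s ++ sep) acc
        = (y :: ys).foldl (fun a s => a ++ " " ++ s ++ sep) (acc ++ " " ++ x ++ sep) from rfl,
      ih, join_cons_cons']
    simp [String.append_assoc]

lemma list_to_words_eq_alt (l : List String) : list_to_words l = list_to_words_alt l := by
  match l with
  | [] => rfl
  | [x] =>
    simp [list_to_words, list_to_words_alt, PySem.List.pyRange_one_cons (show (0:Int) < 1 by norm_num),
      PySem.List.pyRange_one_eq_nil (le_refl (1:Int)), PySem.List.pyGetD_zero_cons]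
  | x :: y :: rest =>
    set l := x :: y :: rest with hl
    have hn : 2 ≤ l.length := by simp [hl]
    have hne : l ≠ [] := by simp [hl]
    have hfne : l.dropLast ≠ [] := by simp [hl]
    have h0 : (0:Int) < (l.length : Int) := by exact_mod_cast Nat.lt_of_lt_of_le Nat.zero_lt_two hn
    -- A side
    show list_to_words l = list_to_words_alt l
    have hsplit : PySem.List.pyRange 0 (l.length : Int)
        = PySem.List.pyRange 0 ((l.length : Int) - 1) ++ [(l.length : Int) - 1] := by
      have h := PySem.List.pyRange_one_succ_right (a := (0:Int)) (b := (l.length : Int) - 1) (by omega)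
      rw [show ((l.length:Int)-1)+1 = (l.length:Int) by ring] at h
      exact h
    have hlast : PySem.List.pyGetD l ((l.length : Int) - 1) "" = l.getLast hne := by
      rw [PySem.List.pyGetD_eq_getElem l "" (by omega) (by omega)]
      simp only [show ((l.length:Int)-1).toNat = l.length - 1 from by omega]
      exact (List.getLast_eq_getElem hne).symm
    have hfront : (PySem.List.pyRange 0 ((l.length:Int) - 1)).foldl
        (fun list_string i =>
          let list_string := if i = (l.length:Int) - 1 ∧ (l.length:Int) ≥ 2 then list_string ++ " and" else list_string
          let list_string := list_string ++ " " ++ PySem.List.pyGetD l i ""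
          if i ≠ (l.length:Int) - 1 ∧ (l.length:Int) ≥ 3 then list_string ++ "," else list_string) ""
        = " " ++ PySem.Str.join (((if l.length ≥ 3 then "," else "") ++ " ")) l.dropLast
            ++ (if l.length ≥ 3 then "," else "") := by
      rw [PySem.List.foldl_congr_mem _ _
        (fun acc i => acc ++ " " ++ PySem.List.pyGetD l.dropLast i "" ++ (if l.length ≥ 3 then "," else "")) _ ?_]
      · have hlen : ((l.length:Int) - 1) = PySem.List.len l.dropLast := by
          simp [PySem.List.len]; omega
        rw [hlen]
        rw [PySem.List.foldl_pyRange_pyGetD l.dropLast ""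
          (fun acc s => acc ++ " " ++ s ++ (if l.length ≥ 3 then "," else "")) "" (le_refl 0)]
        rw [Int.toNat_zero, List.drop_zero]
        rw [show l.dropLast = x :: (y :: rest).dropLast from rfl]
        rw [foldl_words]
        simp
      · intro acc i hi
        rw [PySem.List.mem_pyRange_one] at hi
        have hne' : i ≠ (l.length:Int) - 1 := by omega
        simp only [hne', false_and, if_neg, ne_eq, not_false_iff, true_and]
        have hgd : PySem.List.pyGetD l i "" = PySem.List.pyGetD l.dropLast i "" := by
          rw [PySem.List.pyGetD_eq_getElem l "" (by omega) (by omega),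
              PySem.List.pyGetD_eq_getElem l.dropLast "" (by omega)
                (by rw [List.length_dropLast]; omega)]
          simp
        rw [hgd]
        by_cases h3 : (3:Int) ≤ (l.length:Int)
        · rw [if_pos h3, if_pos (by exact_mod_cast h3)]
        · rw [if_neg h3, if_neg (by
            intro hc; exact h3 (by exact_mod_cast hc))]
          simp
    simp only [list_to_words]
    rw [if_pos h0, hsplit, List.foldl_append, hfront]
    simp only [List.foldl_cons, List.foldl_nil]
    rw [if_neg (show ¬((l.length:Int) - 1 ≠ (l.length:Int) - 1 ∧ (l.length:Int) ≥ 3) by simp)]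
    rw [if_pos (show (True ∧ (l.length:Int) ≥ 2) from ⟨trivial, by exact_mod_cast hn⟩)]
    rw [hlast]
    show _ = list_to_words_alt l
    rw [show list_to_words_alt l = " " ++ PySem.Str.join (((if l.length ≥ 3 then "," else "") ++ " ")) (PySem.List.slice l none (some (-1)))
          ++ (if l.length ≥ 3 then "," else "") ++ " and " ++ PySem.List.pyGetD l (-1) "" from rfl]
    rw [PySem.List.slice_to_neg_one, PySem.List.pyGetD_neg_one _ _ hne]
    simp only [String.append_assoc]
    rfl

-- ===== VERDICT (by name: the statement is the Claim_ definition above) =====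
theorem list_to_words_spec : Claim_equal_list_to_words := by
  intro object_list _
  unfold Spec_list_to_words
  exact list_to_words_eq_alt object_list
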